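-- pv_equiv track=rewrite | github.com/JRA2002/python_problems | others/chocolate_distribution.py | chocolate_distribution
-- ===== SOURCE A (Python) =====
-- def chocolate_distribution(arr : list, m):
--     arr.sort()
--     min_diff = arr[0:m][-1] - arr[0:m][0]
--
--     for i in range(1, len(arr) - m + 1):
--         new = arr[i:m+i]
--         diff = new[-1] - new[0]
--         if min_diff >= diff:
--             min_diff = diff
--
--     return min_diff
-- ===== SOURCE B (Python) =====
-- def chocolate_distribution(arr: list, m):
--     # Binary search on the answer: the smallest d >= 0 such that some m
--     # consecutive values of the sorted list fit in a span of d (checked by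
--     # a two-pointer sweep), instead of enumerating every window's span.
--     arr.sort()
--     lo, hi = 0, arr[-1] - arr[0]
--     while lo < hi:
--         mid = (lo + hi) // 2
--         if _fits(arr, m, mid):
--             hi = mid
--         else:
--             lo = mid + 1
--     return lo
--
--
-- def _fits(s, m, d):
--     # sorted s: is there a run of at least m elements whose span is <= d?
--     j = 0
--     for i in range(len(s)):
--         while s[i] - s[j] > d:
--             j += 1
--         if i - j + 1 >= m:
--             return True
--     return False
-- ===== Notes on version B (the rewrite author's own statement) =====
-- stated objective: faster
-- what changed: B replaces A's exhaustive minimum over all m-element windows (rebuilding each window by slicing) with a parametric search: binary search on the candidate answer d, each candidate tested by a single two-pointer sweep asking whether some run of m consecutive sorted values fits in span d.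
import Mathlib
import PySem

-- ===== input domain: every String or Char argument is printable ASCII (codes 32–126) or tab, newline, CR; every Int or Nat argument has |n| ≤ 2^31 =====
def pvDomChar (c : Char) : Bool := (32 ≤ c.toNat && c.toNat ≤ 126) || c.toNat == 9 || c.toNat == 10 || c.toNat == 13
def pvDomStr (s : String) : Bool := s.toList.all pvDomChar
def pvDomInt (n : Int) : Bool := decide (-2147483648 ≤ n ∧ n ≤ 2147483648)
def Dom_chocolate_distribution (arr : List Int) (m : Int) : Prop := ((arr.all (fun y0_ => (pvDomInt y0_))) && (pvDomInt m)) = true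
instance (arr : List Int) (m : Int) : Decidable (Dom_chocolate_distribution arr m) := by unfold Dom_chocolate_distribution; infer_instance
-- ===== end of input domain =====

-- B replaces A's window enumeration by a binary search on the answer with a two-pointer
-- feasibility sweep (alternative algorithm). Both A and B sort arr in place; the
-- equivalence proved here is about the return value.

-- ===== PORT A =====
def chocolate_distribution (arr : List Int) (m : Int) : Int :=
  let s := PySem.List.sorted arr (fun x => x) false
  let w := PySem.List.slice s (some 0) (some m)
  let min_diff := (PySem.List.pyGet? w (-1)).getD 0 - (PySem.List.pyGet? w 0).getD 0
  (PySem.List.pyRange 1 ((s.length : Int) - m + 1) 1).foldl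
    (fun md i =>
      let nw := PySem.List.slice s (some i) (some (m + i))
      let diff := (PySem.List.pyGet? nw (-1)).getD 0 - (PySem.List.pyGet? nw 0).getD 0
      if md ≥ diff then diff else md) min_diff

-- ===== PORT B =====
-- the inner 'while s[i] - s[j] > d: j += 1'; fuel = len(s) bounds the advance (j never
-- passes i when d ≥ 0, which is the only way B's search calls it)
def chocAdvance (s : List Int) (d vi : Int) : Nat → Int → Int
  | 0, j => j
  | Nat.succ fuel, j =>
      if vi - (PySem.List.pyGet? s j).getD 0 > d then chocAdvance s d vi fuel (j + 1) else j

-- the 'for i in range(len(s))' loop of _fits, carrying the left pointer j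
def chocFitsGo (s : List Int) (m d : Int) : List Int → Int → Bool
  | [], _ => false
  | i :: is, j =>
      let j' := chocAdvance s d ((PySem.List.pyGet? s i).getD 0) s.length j
      if i - j' + 1 ≥ m then true else chocFitsGo s m d is j'

def chocFits (s : List Int) (m d : Int) : Bool :=
  chocFitsGo s m d (PySem.List.pyRange 0 (s.length : Int) 1) 0

-- 'while lo < hi'; the gap shrinks every iteration, so fuel = (hi - lo).toNat can never
-- run out before the loop ends (proved in pv_search_eq)
def chocSearch (s : List Int) (m : Int) : Nat → Int → Int → Int
  | 0, lo, _ => lo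
  | Nat.succ fuel, lo, hi =>
    if lo < hi then
      let mid := PySem.Int.floordiv (lo + hi) 2
      if chocFits s m mid then chocSearch s m fuel lo mid
      else chocSearch s m fuel (mid + 1) hi
    else lo

def chocolate_distribution_alt (arr : List Int) (m : Int) : Int :=
  let s := PySem.List.sorted arr (fun x => x) false
  let hi := (PySem.List.pyGet? s (-1)).getD 0 - (PySem.List.pyGet? s 0).getD 0
  chocSearch s m (hi - 0).toNat 0 hi

-- ===== PRECONDITION & SPEC =====
-- Pre_ excludes exactly the inputs where Python A raises IndexError: empty arr, or m ≤ 0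
-- (the slices it indexes are then empty).
def Pre_chocolate_distribution (arr : List Int) (m : Int) : Prop := arr ≠ [] ∧ 1 ≤ m
instance (arr : List Int) (m : Int) : Decidable (Pre_chocolate_distribution arr m) := by unfold Pre_chocolate_distribution; infer_instance
def pvWitness_chocolate_distribution : List Int × Int := ([3, 4, 1, 9, 56, 7, 9, 12], 5)

def Spec_chocolate_distribution (arr : List Int) (m : Int) (out : Int) : Prop := out = chocolate_distribution_alt arr m
instance (arr : List Int) (m : Int) (out : Int) : Decidable (Spec_chocolate_distribution arr m out) := by unfold Spec_chocolate_distribution; infer_instance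

-- ===== CLAIM (what is proved, stated in full; the proofs are below) =====
def Claim_equal_chocolate_distribution : Prop := ∀ (arr : List Int) (m : Int), Dom_chocolate_distribution arr m → Pre_chocolate_distribution arr m → Spec_chocolate_distribution arr m (chocolate_distribution arr m)

-- ===== LEMMAS AND PROOFS =====

-- binary-search midpoint bounds
lemma choc_mid_bounds {lo hi : Int} (h : lo < hi) :
    lo ≤ PySem.Int.floordiv (lo + hi) 2 ∧ PySem.Int.floordiv (lo + hi) 2 < hi := by
  rw [PySem.Int.floordiv_eq_ediv_of_pos (by norm_num)]
  omega


-- s[k] with default 0 (indices as naturals)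
def pvG (s : List Int) (k : Nat) : Int := (s[k]?).getD 0

-- window difference as index arithmetic, over Int start index
def pvF (s : List Int) (m i : Int) : Int :=
  (PySem.List.pyGet? s (i + m - 1)).getD 0 - (PySem.List.pyGet? s i).getD 0

-- 'a window of m consecutive sorted values starting at a fits in span d'
def pvWin (s : List Int) (m d : Int) (a : Nat) : Prop :=
  a + m.toNat ≤ s.length ∧ pvG s (a + m.toNat - 1) - pvG s a ≤ d

-- the slice-based difference at start i equals pvF s m i, for a window inside the list
lemma pv_slice_diff (s : List Int) (m i : Int) (hi : 0 ≤ i) (hm : 1 ≤ m)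
    (hub : (i + m).toNat ≤ s.length) :
    (PySem.List.pyGet? (PySem.List.slice s (some i) (some (m + i))) (-1)).getD 0
      - (PySem.List.pyGet? (PySem.List.slice s (some i) (some (m + i))) 0).getD 0
      = pvF s m i := by
  have h0m : (0:Int) ≤ m + i := by omega
  rw [PySem.List.slice_toNat s hi h0m]
  set j := i.toNat with hj
  have hmi : (m + i).toNat = j + m.toNat := by omega
  have hmn : 1 ≤ m.toNat := by omega
  set k := m.toNat with hk
  have hlen2 : ((s.drop j).take ((m + i).toNat - j)).length = k := by
    simp [hmi]
    omega
  have hget : ∀ p : Nat, p < k → ((s.drop j).take ((m + i).toNat - j))[p]? = s[j + p]? := by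
    intro p hp
    rw [List.getElem?_take, if_pos (by omega), List.getElem?_drop]
  rw [PySem.List.pyGet?_neg_one, List.getLast?_eq_getElem?, hlen2, hget (k-1) (by omega),
      PySem.List.pyGet?_zero, hget 0 (by omega)]
  unfold pvF
  have e1 : i + m - 1 = ((j + (k - 1) : Nat) : Int) := by push_cast; omega
  have e2 : i = ((j + 0 : Nat) : Int) := by push_cast; omega
  rw [e1, e2, PySem.List.pyGet?_natCast, PySem.List.pyGet?_natCast]

-- A's body equals: total span if m ≥ n, else the minimum of pvF over all window starts
lemma pv_core (s : List Int) (m : Int) (hs : s ≠ []) (hm : 1 ≤ m) :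
    (let w := PySem.List.slice s (some 0) (some m)
     let min_diff := (PySem.List.pyGet? w (-1)).getD 0 - (PySem.List.pyGet? w 0).getD 0
     (PySem.List.pyRange 1 ((s.length : Int) - m + 1) 1).foldl
       (fun md i =>
         let nw := PySem.List.slice s (some i) (some (m + i))
         let diff := (PySem.List.pyGet? nw (-1)).getD 0 - (PySem.List.pyGet? nw 0).getD 0
         if md ≥ diff then diff else md) min_diff)
    = (if m ≥ (s.length : Int) then
         (PySem.List.pyGet? s (-1)).getD 0 - (PySem.List.pyGet? s 0).getD 0
       else
         ((PySem.List.min?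
             ((PySem.List.pyRange 0 ((s.length : Int) - m + 1) 1).map (pvF s m))
             (fun x => x)).getD 0)) := by
  have hn : 1 ≤ s.length := List.length_pos_of_ne_nil hs
  by_cases hcase : m ≥ (s.length : Int)
  · rw [if_pos hcase]
    have hsl : PySem.List.slice s (some 0) (some m) = s := by
      rw [PySem.List.slice_toNat s le_rfl (by omega)]
      simp
      omega
    have hr : PySem.List.pyRange 1 ((s.length : Int) - m + 1) 1 = [] :=
      PySem.List.pyRange_one_eq_nil (by omega)
    simp only [hsl, hr, List.foldl_nil]
  · rw [if_neg hcase]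
    have hmn : m < (s.length : Int) := by omega
    have hinit : (PySem.List.pyGet? (PySem.List.slice s (some 0) (some m)) (-1)).getD 0
        - (PySem.List.pyGet? (PySem.List.slice s (some 0) (some m)) 0).getD 0 = pvF s m 0 := by
      have := pv_slice_diff s m 0 le_rfl hm (by omega)
      simpa using this
    simp only [hinit]
    have hfold : (PySem.List.pyRange 1 ((s.length : Int) - m + 1) 1).foldl
        (fun md i =>
          let nw := PySem.List.slice s (some i) (some (m + i))
          let diff := (PySem.List.pyGet? nw (-1)).getD 0 - (PySem.List.pyGet? nw 0).getD 0
          if md ≥ diff then diff else md) (pvF s m 0)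
        = (PySem.List.pyRange 1 ((s.length : Int) - m + 1) 1).foldl
            (fun md i => min md (pvF s m i)) (pvF s m 0) := by
      apply PySem.List.foldl_congr_mem
      intro acc i hi
      simp only []
      rw [PySem.List.mem_pyRange_one] at hi
      rw [pv_slice_diff s m i (by omega) hm (by omega)]
      simp only [min_def]
      by_cases h : acc ≥ pvF s m i
      · rw [if_pos h]
        rcases lt_or_eq_of_le h with h' | h'
        · rw [if_neg (by omega)]
        · rw [h']; split <;> rfl
      · rw [if_neg h, if_pos (by omega)]
    rw [hfold]
    have hcons : PySem.List.pyRange 0 ((s.length : Int) - m + 1) 1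
        = 0 :: PySem.List.pyRange 1 ((s.length : Int) - m + 1) 1 := by
      have := PySem.List.pyRange_one_cons (a := 0) (b := (s.length : Int) - m + 1) (by omega)
      simpa using this
    rw [hcons, List.map_cons, PySem.List.min?_id_cons]
    simp only [Option.getD_some, List.foldl_map]

lemma pv_sorted_ne_nil (arr : List Int) (h : arr ≠ []) :
    PySem.List.sorted arr (fun x => x) false ≠ [] := by
  intro hc
  exact h ((PySem.List.sorted_eq_nil_iff arr (fun x => x) false).mp hc)

-- the two-pointer advance: reaches the least fitting left pointer
lemma pv_advance_spec (s : List Int) (d : Int) (hd : 0 ≤ d)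
    (i : Nat) (hi : i < s.length) :
    ∀ (fuel : Nat) (j : Nat), j ≤ i → i - j ≤ fuel →
    ∃ j2 : Nat, chocAdvance s d (pvG s i) fuel (j : Int) = (j2 : Int) ∧ j ≤ j2 ∧ j2 ≤ i ∧
      pvG s i - pvG s j2 ≤ d ∧ ∀ k : Nat, j ≤ k → k < j2 → d < pvG s i - pvG s k := by
  intro fuel
  induction fuel with
  | zero =>
    intro j hj hf
    have hji : j = i := by omega
    subst hji
    exact ⟨j, rfl, le_rfl, le_rfl, by omega, by omega⟩
  | succ fuel ih =>
    intro j hj hf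
    have hpg : (PySem.List.pyGet? s (j : Int)).getD 0 = pvG s j := by
      rw [PySem.List.pyGet?_natCast]; rfl
    simp only [chocAdvance, hpg]
    by_cases hc : pvG s i - pvG s j > d
    · rw [if_pos hc]
      have hji : j < i := by
        rcases eq_or_lt_of_le hj with h | h
        · exfalso; rw [h] at hc; omega
        · exact h
      rw [show ((j : Int) + 1) = ((j + 1 : Nat) : Int) by push_cast; ring]
      obtain ⟨j2, he, h1, h2, h3, h4⟩ := ih (j + 1) (by omega) (by omega)
      refine ⟨j2, he, by omega, h2, h3, fun k hk1 hk2 => ?_⟩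
      rcases eq_or_lt_of_le hk1 with h | h
      · rw [← h]; exact hc
      · exact h4 k (by omega) hk2
    · rw [if_neg hc]
      exact ⟨j, rfl, le_rfl, hj, by omega, by omega⟩

-- the sweep over range(len(s)): finds a window iff one ends at an index not yet passed
lemma pv_fitsGo_iff (s : List Int) (m d : Int) (hm : 1 ≤ m) (hd : 0 ≤ d)
    (hmono : ∀ p q : Nat, p ≤ q → q < s.length → pvG s p ≤ pvG s q) :
    ∀ (cnt i0 j : Nat), i0 + cnt = s.length → j ≤ i0 →
    (∀ k : Nat, k < j → ∀ i : Nat, i0 ≤ i → i < s.length → d < pvG s i - pvG s k) →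
    (chocFitsGo s m d (PySem.List.pyRange (i0 : Int) (s.length : Int) 1) (j : Int) = true
      ↔ ∃ a : Nat, pvWin s m d a ∧ i0 ≤ a + m.toNat - 1) := by
  intro cnt
  induction cnt with
  | zero =>
    intro i0 j h0 hj hpast
    rw [PySem.List.pyRange_one_eq_nil (by exact_mod_cast (by omega : s.length ≤ i0))]
    simp only [chocFitsGo]
    constructor
    · intro h; exact absurd h (by simp)
    · rintro ⟨a, ⟨hle, _⟩, he⟩
      have hmt : 1 ≤ m.toNat := by omega
      omega
  | succ cnt ih =>
    intro i0 j h0 hj hpast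
    have hi0 : i0 < s.length := by omega
    rw [PySem.List.pyRange_one_cons (by exact_mod_cast hi0)]
    have hpg : (PySem.List.pyGet? s (i0 : Int)).getD 0 = pvG s i0 := by
      rw [PySem.List.pyGet?_natCast]; rfl
    simp only [chocFitsGo, hpg]
    obtain ⟨j2, he, hjj2, hj2i, hsat, hskip⟩ :=
      pv_advance_spec s d hd i0 hi0 s.length j hj (by omega)
    rw [he]
    have hpast' : ∀ k : Nat, k < j2 → ∀ i : Nat, i0 + 1 ≤ i → i < s.length →
        d < pvG s i - pvG s k := by
      intro k hk i hi1 hi2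
      by_cases hkj : k < j
      · exact hpast k hkj i (by omega) hi2
      · have h1 : d < pvG s i0 - pvG s k := hskip k (by omega) hk
        have h2 : pvG s i0 ≤ pvG s i := hmono i0 i (by omega) hi2
        omega
    have hm1 : 1 ≤ m.toNat := by omega
    by_cases hdet : (i0 : Int) - (j2 : Int) + 1 ≥ m
    · rw [if_pos hdet]
      constructor
      · intro _
        refine ⟨i0 + 1 - m.toNat, ⟨by omega, ?_⟩, by omega⟩
        rw [show i0 + 1 - m.toNat + m.toNat - 1 = i0 by omega]
        have haj : j2 ≤ i0 + 1 - m.toNat := by omega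
        have := hmono j2 (i0 + 1 - m.toNat) haj (by omega)
        omega
      · intro _; rfl
    · rw [if_neg hdet]
      rw [show ((i0 : Int) + 1) = ((i0 + 1 : Nat) : Int) by push_cast; ring]
      rw [ih (i0 + 1) j2 (by omega) (by omega) hpast']
      constructor
      · rintro ⟨a, hw, he2⟩; exact ⟨a, hw, by omega⟩
      · rintro ⟨a, hw, he2⟩
        refine ⟨a, hw, ?_⟩
        by_contra hlt2
        have hei0 : a + m.toNat - 1 = i0 := by omega
        obtain ⟨hle, hspan⟩ := hw
        have haj2 : j2 ≤ a := by
          by_contra hcc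
          have hfail : d < pvG s i0 - pvG s a := by
            by_cases haj : a < j
            · exact hpast a haj i0 le_rfl hi0
            · exact hskip a (by omega) (by omega)
          rw [hei0] at hspan
          omega
        exact absurd (by omega : (i0 : Int) - (j2 : Int) + 1 ≥ m) hdet

lemma pv_fits_iff (s : List Int) (m d : Int) (hm : 1 ≤ m) (hd : 0 ≤ d)
    (hmono : ∀ p q : Nat, p ≤ q → q < s.length → pvG s p ≤ pvG s q) :
    (chocFits s m d = true ↔ ∃ a : Nat, pvWin s m d a) := by
  unfold chocFits
  have h := pv_fitsGo_iff s m d hm hd hmono s.length 0 0 (by omega) (by omega)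
    (by intro k hk; omega)
  rw [show ((0:Nat):Int) = (0:Int) by norm_num] at h
  rw [h]
  constructor
  · rintro ⟨a, hw, _⟩; exact ⟨a, hw⟩
  · rintro ⟨a, hw⟩; exact ⟨a, hw, by omega⟩

-- the binary search returns the threshold of any monotone characterisation
lemma pv_search_eq (s : List Int) (m : Int) :
    ∀ (fuel : Nat) (lo hi t : Int), (hi - lo).toNat ≤ fuel → lo ≤ t → t ≤ hi →
    (∀ d, lo ≤ d → d < hi → (chocFits s m d = true ↔ t ≤ d)) →
    chocSearch s m fuel lo hi = t := by
  intro fuel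
  induction fuel with
  | zero =>
    intro lo hi t hf hlt hth hchar
    simp only [chocSearch]
    omega
  | succ fuel ih =>
    intro lo hi t hf hlt hth hchar
    simp only [chocSearch]
    by_cases h : lo < hi
    · rw [if_pos h]
      obtain ⟨hml, hmh⟩ := choc_mid_bounds h
      by_cases hfit : chocFits s m (PySem.Int.floordiv (lo + hi) 2) = true
      · rw [if_pos hfit]
        have hmid : t ≤ PySem.Int.floordiv (lo + hi) 2 := (hchar _ hml hmh).mp hfit
        exact ih lo _ t (by omega) hlt hmid (fun d h1 h2 => hchar d h1 (by omega))
      · rw [if_neg hfit]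
        have hmid : PySem.Int.floordiv (lo + hi) 2 < t := by
          by_contra hc
          exact hfit ((hchar _ hml hmh).mpr (by omega))
        exact ih _ hi t (by omega) (by omega) hth (fun d h1 h2 => hchar d (by omega) h2)
    · rw [if_neg h]; omega

-- pvF over pvG, for a nonnegative start index
lemma pv_pvF_pvG (s : List Int) (m i : Int) (hm : 1 ≤ m) (h0 : 0 ≤ i) :
    pvF s m i = pvG s (i.toNat + m.toNat - 1) - pvG s i.toNat := by
  unfold pvF pvG
  rw [show i + m - 1 = ((i.toNat + m.toNat - 1 : Nat) : Int) by omega,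
      show i = ((i.toNat : Nat) : Int) by omega,
      PySem.List.pyGet?_natCast, PySem.List.pyGet?_natCast]
  simp only [Int.toNat_natCast]

-- ===== VERDICT (by name: the statement is the Claim_ definition above) =====
theorem chocolate_distribution_spec : Claim_equal_chocolate_distribution := by
  rintro arr m _ ⟨hne, hm⟩
  unfold Spec_chocolate_distribution
  set s := PySem.List.sorted arr (fun x => x) false with hsdef
  have hsne : s ≠ [] := pv_sorted_ne_nil arr hne
  have hn : 1 ≤ s.length := List.length_pos_of_ne_nil hsne
  have hmono : ∀ p q : Nat, p ≤ q → q < s.length → pvG s p ≤ pvG s q := by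
    intro p q hpq hq
    have hg := PySem.List.sorted_id_getElem_mono (xs := arr) hpq (hsdef ▸ hq)
    unfold pvG
    rw [List.getElem?_eq_getElem (by omega), List.getElem?_eq_getElem hq]
    simpa using hg
  set T : Int := (PySem.List.pyGet? s (-1)).getD 0 - (PySem.List.pyGet? s 0).getD 0 with hTdef
  have hT : T = pvG s (s.length - 1) - pvG s 0 := by
    rw [hTdef, PySem.List.pyGet?_neg_one, PySem.List.pyGet?_zero,
        List.getLast?_eq_getElem?]
    rfl
  have hT0 : 0 ≤ T := by
    rw [hT]
    have := hmono 0 (s.length - 1) (by omega) (by omega)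
    omega
  have hA : chocolate_distribution arr m
      = (if m ≥ (s.length : Int) then T
         else ((PySem.List.min?
             ((PySem.List.pyRange 0 ((s.length : Int) - m + 1) 1).map (pvF s m))
             (fun x => x)).getD 0)) := pv_core s m hsne hm
  have hB : chocolate_distribution_alt arr m = chocSearch s m (T - 0).toNat 0 T := rfl
  rw [hA, hB]
  have hm1 : 1 ≤ m.toNat := by omega
  by_cases hbig : m ≥ (s.length : Int)
  · rw [if_pos hbig]
    symm
    apply pv_search_eq s m _ 0 T T le_rfl hT0 le_rfl
    intro d hd0 hdT
    rw [pv_fits_iff s m d hm hd0 hmono]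
    constructor
    · rintro ⟨a, hle, hspan⟩
      exfalso
      have ha0 : a = 0 := by omega
      have hmtn : m.toNat = s.length := by omega
      subst ha0
      rw [hmtn] at hspan
      simp only [Nat.zero_add] at hspan
      rw [hT] at hdT
      unfold pvWin at *
      omega
    · intro h; omega
  · rw [if_neg hbig]
    -- the window-minimum M
    have hrange12 : (0 : Int) < (s.length : Int) - m + 1 := by omega
    have hne2 : (PySem.List.pyRange 0 ((s.length : Int) - m + 1) 1).map (pvF s m) ≠ [] := by
      rw [PySem.List.pyRange_one_cons (by omega)]
      simp
    obtain ⟨v, hv⟩ : ∃ v, PySem.List.min?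
        ((PySem.List.pyRange 0 ((s.length : Int) - m + 1) 1).map (pvF s m))
        (fun x => x) = some v := by
      cases hvv : PySem.List.min?
          ((PySem.List.pyRange 0 ((s.length : Int) - m + 1) 1).map (pvF s m))
          (fun x => x) with
      | none => exact absurd ((PySem.List.min?_eq_none_iff _ _).mp hvv) hne2
      | some v => exact ⟨v, rfl⟩
    have hvmem := PySem.List.min?_mem hv
    have hvmin := PySem.List.min?_isMin hv
    obtain ⟨i0, hi0mem, hi0eq⟩ := List.mem_map.mp hvmem
    rw [PySem.List.mem_pyRange_one] at hi0mem
    have hi0n : i0.toNat + m.toNat ≤ s.length := by omega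
    have hvG : v = pvG s (i0.toNat + m.toNat - 1) - pvG s i0.toNat := by
      rw [← hi0eq, pv_pvF_pvG s m i0 hm hi0mem.1]
    have hv0 : 0 ≤ v := by
      rw [hvG]
      have := hmono i0.toNat (i0.toNat + m.toNat - 1) (by omega) (by omega)
      omega
    have hvT : v ≤ T := by
      have h0mem : pvF s m 0 ∈ (PySem.List.pyRange 0 ((s.length : Int) - m + 1) 1).map (pvF s m) :=
        List.mem_map.mpr ⟨0, PySem.List.mem_pyRange_one.mpr ⟨le_rfl, by omega⟩, rfl⟩
      have hle := hvmin _ h0mem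
      have hF0 : pvF s m 0 = pvG s (m.toNat - 1) - pvG s 0 := by
        rw [pv_pvF_pvG s m 0 hm le_rfl]
        norm_num
      have := hmono (m.toNat - 1) (s.length - 1) (by omega) (by omega)
      rw [hT]
      rw [hF0] at hle
      omega
    rw [hv, Option.getD_some]
    symm
    apply pv_search_eq s m _ 0 T v le_rfl hv0 hvT
    intro d hd0 hdT
    rw [pv_fits_iff s m d hm hd0 hmono]
    constructor
    · rintro ⟨a, hle, hspan⟩
      have hamem : pvF s m (a : Int)
          ∈ (PySem.List.pyRange 0 ((s.length : Int) - m + 1) 1).map (pvF s m) :=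
        List.mem_map.mpr ⟨(a : Int), PySem.List.mem_pyRange_one.mpr ⟨by omega, by omega⟩, rfl⟩
      have hF : pvF s m (a : Int) = pvG s (a + m.toNat - 1) - pvG s a := by
        rw [pv_pvF_pvG s m (a : Int) hm (by omega)]
        norm_num
      have := hvmin _ hamem
      simp only at this
      omega
    · intro hvd
      refine ⟨i0.toNat, ⟨hi0n, ?_⟩⟩
      rw [← hvG]
      omega
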